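-- pv_equiv track=rewrite | github.com/path-of-tan/py2048 | 2048game.py | max_dig
-- ===== SOURCE A (Python) =====
-- def max_dig(matrix):
--     bignum = 0
--     for rows in matrix:
--         for cols in rows:
--             if bignum < cols:
--                 bignum = cols
--     temp = 0
--     if bignum == 0:
--         temp = 1
--     while bignum:
--         temp = temp + 1
--         bignum = bignum//10
--     return temp
-- ===== SOURCE B (Python) =====
-- def max_dig(matrix):
--     # Never computes the numeric maximum: take the max digit count of the
--     # positive entries directly (digit count is monotone on positives);
--     # default 1 covers empty/all-nonpositive matrices, matching A's floor at 0.
--     return max((len(str(c)) for row in matrix for c in row if c > 0), default=1)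
-- ===== Notes on version B (the rewrite author's own statement) =====
-- stated objective: simpler
-- what changed: B drops A's two-phase max-then-divide-by-10 counting: it maps each positive element straight to its digit count len(str(c)) and takes max(..., default=1), with no mutable running maximum, no zero special-case and no division loop.
import Mathlib
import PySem

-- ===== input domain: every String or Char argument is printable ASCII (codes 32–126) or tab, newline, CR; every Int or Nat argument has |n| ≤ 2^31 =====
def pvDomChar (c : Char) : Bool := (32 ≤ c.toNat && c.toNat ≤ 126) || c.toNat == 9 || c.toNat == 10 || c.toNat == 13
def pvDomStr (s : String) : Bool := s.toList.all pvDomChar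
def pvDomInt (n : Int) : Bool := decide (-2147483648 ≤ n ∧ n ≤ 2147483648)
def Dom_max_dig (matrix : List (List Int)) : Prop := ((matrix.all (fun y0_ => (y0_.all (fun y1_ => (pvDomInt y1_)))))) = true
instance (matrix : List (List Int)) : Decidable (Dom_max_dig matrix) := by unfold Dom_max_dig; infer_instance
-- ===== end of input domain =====

-- B replaces A's "find the numeric maximum, then count its digits by repeated //10"
-- with "max of len(str(c)) over positive elements, default 1" — simpler: no mutable
-- running maximum, no zero special-case, no division loop.


-- ===== PORT A =====
-- A's 'while bignum: temp += 1; bignum //= 10'.  bignum starts at 0 and only ever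
-- increases, so it is ≥ 0 when the loop starts; on nonnegative ints Python's //10
-- is Nat division, so running the loop on bignum.toNat is exact there.
def pyDigitLoop : Nat → Int → Int
  | 0, temp => temp
  | n + 1, temp => pyDigitLoop ((n + 1) / 10) (temp + 1)
decreasing_by exact Nat.div_lt_self (Nat.succ_pos n) (by omega)

def max_dig (matrix : List (List Int)) : Int :=
  let bignum := matrix.foldl (fun b rows => rows.foldl (fun b cols => if b < cols then cols else b) b) 0
  let temp : Int := if bignum == 0 then 1 else 0
  pyDigitLoop bignum.toNat temp

-- ===== PORT B =====
-- max((len(str(c)) for row in matrix for c in row if c > 0), default=1)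
def max_dig_alt (matrix : List (List Int)) : Int :=
  PySem.List.maxD
    (matrix.flatMap (fun row =>
      (row.filter (fun c => decide (0 < c))).map (fun c => PySem.Str.len (PySem.Int.toStr c))))
    (fun x => x) 1

-- ===== PRECONDITION & SPEC =====
def Spec_max_dig (matrix : List (List Int)) (out : Int) : Prop := out = max_dig_alt matrix
instance (matrix : List (List Int)) (out : Int) : Decidable (Spec_max_dig matrix out) := by unfold Spec_max_dig; infer_instance

-- ===== CLAIM (what is proved, stated in full; the proofs are below) =====
def Claim_equal_max_dig : Prop := ∀ (matrix : List (List Int)), Dom_max_dig matrix → Spec_max_dig matrix (max_dig matrix)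

-- ===== LEMMAS AND PROOFS =====

/-- Digit count of a natural number, as an Int. -/
def digCount (n : Nat) : Int := (Nat.log 10 n : Int) + 1

lemma pyDigitLoop_eq (n : Nat) : ∀ t : Int, 0 < n → pyDigitLoop n t = t + digCount n := by
  induction n using Nat.strong_induction_on with
  | _ n ih =>
    intro t hn
    obtain ⟨m, rfl⟩ : ∃ m, n = m + 1 := ⟨n - 1, by omega⟩
    rw [pyDigitLoop]
    by_cases hlt : m + 1 < 10
    · have h0 : (m + 1) / 10 = 0 := Nat.div_eq_of_lt hlt
      have hlog : Nat.log 10 (m + 1) = 0 := Nat.log_eq_zero_iff.mpr (Or.inl hlt)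
      rw [h0, pyDigitLoop, digCount, hlog]
      push_cast; ring
    · have h10 : 10 ≤ m + 1 := by omega
      have hdiv_pos : 0 < (m + 1) / 10 := Nat.div_pos h10 (by omega)
      have hdiv_lt : (m + 1) / 10 < m + 1 := Nat.div_lt_self (by omega) (by omega)
      rw [ih _ hdiv_lt _ hdiv_pos]
      have hlogpos : 0 < Nat.log 10 (m + 1) := Nat.log_pos (by omega) h10
      have hld : Nat.log 10 ((m + 1) / 10) = Nat.log 10 (m + 1) - 1 := Nat.log_div_base 10 (m + 1)
      simp only [digCount, hld]
      have : ((Nat.log 10 (m + 1) - 1 : Nat) : Int) = (Nat.log 10 (m + 1) : Int) - 1 := by omega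
      rw [this]; ring

lemma toDigitsCore_len_exact :
    ∀ (fuel n : Nat) (ds : List Char), 0 < fuel → n < 10 ^ fuel →
      (Nat.toDigitsCore 10 fuel n ds).length = ds.length + Nat.log 10 n + 1 := by
  intro fuel
  induction fuel with
  | zero => intro n ds h; omega
  | succ f ih =>
    intro n ds _ hn
    rw [Nat.toDigitsCore]
    by_cases h0 : n / 10 = 0
    · have hn10 : n < 10 := by
        rcases Nat.div_eq_zero_iff.mp h0 with h | h
        · omega
        · exact h
      have hlog : Nat.log 10 n = 0 := Nat.log_eq_zero_iff.mpr (Or.inl hn10)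
      simp [h0, hlog]
    · have h10 : 10 ≤ n := by
        by_contra hcon
        exact h0 (Nat.div_eq_of_lt (by omega))
      have hf : 0 < f := by
        by_contra hf0
        have : f = 0 := by omega
        subst this
        simp at hn; omega
      have hdivlt : n / 10 < 10 ^ f := by
        apply (Nat.div_lt_iff_lt_mul (by omega)).mpr
        calc n < 10 ^ (f + 1) := hn
        _ = 10 ^ f * 10 := by ring
      rw [if_neg h0]
      rw [ih (n / 10) _ hf hdivlt]
      have hlogpos : 0 < Nat.log 10 n := Nat.log_pos (by omega) h10
      have hld : Nat.log 10 (n / 10) = Nat.log 10 n - 1 := Nat.log_div_base 10 n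
      simp [hld]
      omega

lemma toStr_len_pos (c : Int) (hc : 0 < c) :
    PySem.Str.len (PySem.Int.toStr c) = digCount c.toNat := by
  rw [PySem.Str.len_eq]
  have hneg : ¬ c < 0 := by omega
  simp only [PySem.Int.toStr, PySem.Int.toChars, hneg, if_false, String.toList_ofList]
  rw [Nat.toDigits]
  have hlt : c.toNat < 10 ^ (c.toNat + 1) := by
    have h1 : c.toNat < 10 ^ c.toNat := Nat.lt_pow_self (by omega)
    have h2 : 10 ^ c.toNat ≤ 10 ^ (c.toNat + 1) := Nat.pow_le_pow_right (by omega) (by omega)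
    omega
  rw [toDigitsCore_len_exact (c.toNat + 1) c.toNat [] (by omega) hlt]
  simp [digCount]

lemma digCount_mono {a b : Nat} (h : a ≤ b) : digCount a ≤ digCount b := by
  simp only [digCount, add_le_add_iff_right]
  exact_mod_cast Nat.log_mono_right h

-- A's fold over rows of folds over columns = one fold over the flattened matrix.
lemma foldA_flat (matrix : List (List Int)) (b : Int) :
    matrix.foldl (fun b rows => rows.foldl (fun b cols => if b < cols then cols else b) b) b
      = (matrix.flatMap id).foldl (fun b cols => if b < cols then cols else b) b := by
  induction matrix generalizing b with
  | nil => rfl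
  | cons row rest ih => simp [List.foldl_append, ih]

-- B's fold step over the flattened elements.
def bstep (a : Option Int) (c : Int) : Option Int :=
  match (if 0 < c then some (PySem.Str.len (PySem.Int.toStr c)) else none) with
  | none => a
  | some y =>
    match a with
    | none => some y
    | some m => if m < y then some y else some m

lemma filter_map_eq_filterMap (p : Int → Prop) [DecidablePred p] (g : Int → Int) (row : List Int) :
    (row.filter (fun c => decide (p c))).map g = row.filterMap (fun c => if p c then some (g c) else none) := by
  induction row with
  | nil => rfl
  | cons c rest ih =>
    by_cases hc : p c <;> simp [hc, ih]

lemma flatMap_filterMap (h : Int → Option Int) (matrix : List (List Int)) :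
    (matrix.flatMap (fun row => row.filterMap h)) = (matrix.flatMap id).filterMap h := by
  induction matrix with
  | nil => rfl
  | cons row rest ih => simp [List.filterMap_append, ih]

lemma foldl_filterMap_gen {α β γ : Type} (h : α → Option β) (g : γ → β → γ) (xs : List α) :
    ∀ init : γ, (xs.filterMap h).foldl g init
      = xs.foldl (fun a c => match h c with | some y => g a y | none => a) init := by
  induction xs with
  | nil => intro init; rfl
  | cons c rest ih =>
    intro init
    cases hc : h c <;> simp [hc, ih]

lemma B_as_fold (matrix : List (List Int)) :
    max_dig_alt matrix = (((matrix.flatMap id).foldl bstep none).getD 1) := by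
  unfold max_dig_alt PySem.List.maxD PySem.List.max?
  congr 1
  simp only [filter_map_eq_filterMap (fun c : Int => 0 < c) (fun c => PySem.Str.len (PySem.Int.toStr c))]
  rw [flatMap_filterMap, foldl_filterMap_gen]
  congr 1
  funext a c
  by_cases hc : 0 < c <;> cases a <;> simp [bstep, hc]

-- The central induction: walking the flattened element list, A's running maximum b
-- and B's running best digit count acc stay linked, and the final answers agree.
lemma main_inv (xs : List Int) :
    ∀ (b : Int) (acc : Option Int), 0 ≤ b → (acc = none ↔ b = 0) →
      (∀ v, acc = some v → v = digCount b.toNat) →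
      pyDigitLoop (xs.foldl (fun b cols => if b < cols then cols else b) b).toNat
          (if (xs.foldl (fun b cols => if b < cols then cols else b) b) == 0 then (1 : Int) else 0)
        = (xs.foldl bstep acc).getD 1 := by
  induction xs with
  | nil =>
    intro b acc hb hnone hsome
    simp only [List.foldl_nil]
    by_cases hb0 : b = 0
    · subst hb0
      rw [hnone.mpr rfl]
      simp [pyDigitLoop]
    · have hbeq : (b == 0) = false := by simp [hb0]
      simp only [hbeq, Bool.false_eq_true, if_false]
      cases hacc : acc with
      | none => exact absurd (hnone.mp hacc) hb0
      | some v =>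
        rw [hsome v hacc, pyDigitLoop_eq b.toNat 0 (by omega)]
        simp
  | cons c rest ih =>
    intro b acc hb hnone hsome
    simp only [List.foldl_cons]
    by_cases hc : 0 < c
    · -- positive element: acc becomes some, the new maximum is positive
      have hL := toStr_len_pos c hc
      by_cases hbc : b < c
      · -- new maximum is c
        simp only [if_pos hbc]
        cases hacc : acc with
        | none =>
          apply ih c (bstep none c) (by omega)
          · constructor
            · intro h
              simp only [bstep, if_pos hc] at h
              simp at h
            · intro h; omega
          · intro v hv
            simp only [bstep, if_pos hc] at hv
            injection hv with hv
            rw [← hv]; exact hL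
        | some m =>
          have hm := hsome m hacc
          apply ih c (bstep (some m) c) (by omega)
          · constructor
            · intro h
              simp only [bstep, if_pos hc] at h
              split at h <;> simp at h
            · intro h; omega
          · intro v hv
            simp only [bstep, if_pos hc] at hv
            have hmono : digCount b.toNat ≤ digCount c.toNat :=
              digCount_mono (Int.toNat_le_toNat (le_of_lt hbc))
            by_cases hlt : m < PySem.Str.len (PySem.Int.toStr c)
            · rw [if_pos hlt] at hv
              injection hv with hv
              rw [← hv]; exact hL
            · rw [if_neg hlt] at hv
              injection hv with hv
              rw [hL, hm] at hlt
              rw [← hv, hm]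
              omega
      · -- maximum stays b, and b ≥ c > 0 so b > 0
        simp only [if_neg hbc]
        have hbpos : 0 < b := by omega
        cases hacc : acc with
        | none => exact absurd (hnone.mp hacc) (by omega)
        | some m =>
          have hm := hsome m hacc
          apply ih b (bstep (some m) c) hb
          · constructor
            · intro h
              simp only [bstep, if_pos hc] at h
              split at h <;> simp at h
            · intro h; omega
          · intro v hv
            simp only [bstep, if_pos hc] at hv
            have hnlt : ¬ m < PySem.Str.len (PySem.Int.toStr c) := by
              rw [hL, hm]
              exact not_lt.mpr (digCount_mono (Int.toNat_le_toNat (by omega)))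
            rw [if_neg hnlt] at hv
            injection hv with hv
            rw [← hv]; exact hm
    · -- nonpositive element: nothing changes on either side
      have hnb : ¬ b < c := by omega
      simp only [if_neg hnb]
      have hsame : bstep acc c = acc := by simp [bstep, hc]
      rw [hsame]
      exact ih b acc hb hnone hsome

-- ===== VERDICT (by name: the statement is the Claim_ definition above) =====
theorem max_dig_spec : Claim_equal_max_dig := by
  intro matrix _
  unfold Spec_max_dig max_dig
  rw [B_as_fold, foldA_flat]
  exact main_inv (matrix.flatMap id) 0 none le_rfl (by simp) (by intro v h; simp at h)
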